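-- pv_equiv track=rewrite | github.com/VinceFior/major-system | number_encoder.py | format_encoding
-- ===== SOURCE A (Python) =====
-- def format_encoding(encoding):
--     '''
--     Given a list of strings (that are an encoding for a number), formats them with proper
--     capitalization and spacing.
--     '''
--     result = ''
--     is_sentence_start = True
--     for i, word in enumerate(encoding):
--         if is_sentence_start:
--             result += word.capitalize()
--             is_sentence_start = False
--         else:
--             result += word
--         if not any(c.isalpha() for c in word):
--             # we assume a punctuation mark indicates the end of the sentence
--             is_sentence_start = True
--         # add a space only if the next word is not punctuation
--         if i + 1 < len(encoding) and any(c.isalpha() for c in encoding[i + 1]):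
--             result += ' '
--     return result
-- ===== SOURCE B (Python) =====
-- def format_encoding(encoding):
--     '''
--     Given a list of strings (that are an encoding for a number), formats them with proper
--     capitalization and spacing.
--     '''
--     # Stage 1: split the word list into sentences; a word with no alphabetic
--     # character ends the current sentence.
--     sentences = []
--     cur = []
--     for word in encoding:
--         cur.append(word)
--         if not any(c.isalpha() for c in word):
--             sentences.append(cur)
--             cur = []
--     if cur:
--         sentences.append(cur)
--
--     # Stage 2: format one sentence: capitalize its first word, and put a space
--     # before each later word that contains an alphabetic character.
--     def fmt(sent):
--         out = [sent[0].capitalize()]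
--         for w in sent[1:]:
--             out.append((' ' + w) if any(c.isalpha() for c in w) else w)
--         return ''.join(out)
--
--     # Stage 3: join sentences, separating with a space when the next sentence
--     # starts with an alphabetic word.
--     pieces = []
--     for s in sentences:
--         if pieces and any(c.isalpha() for c in s[0]):
--             pieces.append(' ')
--         pieces.append(fmt(s))
--     return ''.join(pieces)
-- ===== Notes on version B (the rewrite author's own statement) =====
-- stated objective: alternative
-- what changed: Replaces A's single stateful pass (is_sentence_start flag plus i+1 lookahead) by three stages: split the word list into sentence chunks ending at each non-alphabetic word, format each sentence independently (capitalize its first word, space before later alphabetic words), then join the sentence pieces with a space before sentences starting with an alphabetic word.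
import Mathlib
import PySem

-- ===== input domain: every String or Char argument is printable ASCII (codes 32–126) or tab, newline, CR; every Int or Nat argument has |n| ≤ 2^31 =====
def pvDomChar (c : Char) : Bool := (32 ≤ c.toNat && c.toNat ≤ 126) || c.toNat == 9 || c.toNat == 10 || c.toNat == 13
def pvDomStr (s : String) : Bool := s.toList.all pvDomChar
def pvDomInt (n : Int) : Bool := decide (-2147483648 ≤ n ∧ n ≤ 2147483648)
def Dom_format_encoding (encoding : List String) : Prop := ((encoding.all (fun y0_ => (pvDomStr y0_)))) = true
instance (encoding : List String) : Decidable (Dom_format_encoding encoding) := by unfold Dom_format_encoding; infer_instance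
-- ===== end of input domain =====

-- B replaces A's single stateful pass by three stages: split the words into sentence chunks, format each sentence, join the pieces; equal return values are proved below.

-- shared helpers for Python idioms both sources use:
-- any(c.isalpha() for c in w)
def pvHasAlpha (w : String) : Bool := w.toList.any PySem.Chars.isalpha
-- w.capitalize(): first char uppercased, the rest lowercased (exact on ASCII; PySem has no capitalize primitive)
def pvCapitalize (cs : List Char) : List Char :=
  match cs with
  | [] => []
  | c :: rest => PySem.Chars.upperChar c :: rest.map PySem.Chars.lowerChar

-- ===== PORT A =====
-- the for-loop over enumerate(encoding): i is the index, rest = encoding.drop i; result kept as List Char (str += is concatenation)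
def formatLoopA (encoding : List String) (i : Nat) (rest : List String) (result : List Char) (isStart : Bool) : List Char :=
  match rest with
  | [] => result
  | word :: tl =>
    let result := if isStart then result ++ pvCapitalize word.toList else result ++ word.toList
    let isStart := !pvHasAlpha word
    let result := if i + 1 < encoding.length && pvHasAlpha (encoding.getD (i + 1) "") then result ++ [' '] else result
    formatLoopA encoding (i + 1) tl result isStart

def format_encoding (encoding : List String) : String :=
  String.ofList (formatLoopA encoding 0 encoding [] true)

-- ===== PORT B =====
-- Stage 1: the grouping loop of Source B (cur accumulates the current sentence, flushed after a non-alpha word; the trailing 'if cur' append)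
def pvGroups (rest : List String) (cur : List String) : List (List String) :=
  match rest with
  | [] => if cur ≠ [] then [cur] else []
  | w :: tl =>
    let cur := cur ++ [w]
    if !pvHasAlpha w then cur :: pvGroups tl [] else pvGroups tl cur

-- Stage 2: fmt(sent): sent[0].capitalize(), then each later word prefixed by ' ' iff it has an alphabetic char; ''.join as flattening
def pvFmt (sent : List String) : List Char :=
  match sent with
  | [] => []  -- unreachable: Source B only calls fmt on nonempty sentences
  | w :: tl =>
    pvCapitalize w.toList ++
      (tl.map (fun x => if pvHasAlpha x then ' ' :: x.toList else x.toList)).flatten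

-- Stage 3: the pieces loop: a separating space before a sentence iff pieces is nonempty and the sentence's first word has an alphabetic char
def pvJoinSents (sents : List (List String)) (nonempty : Bool) : List Char :=
  match sents with
  | [] => []
  | s :: tl =>
    (if nonempty && pvHasAlpha (s.headD "") then [' '] else []) ++ pvFmt s ++ pvJoinSents tl true

def format_encoding_alt (encoding : List String) : String :=
  String.ofList (pvJoinSents (pvGroups encoding []) false)

-- ===== PRECONDITION & SPEC =====
def Spec_format_encoding (encoding : List String) (out : String) : Prop := out = format_encoding_alt encoding
instance (encoding : List String) (out : String) : Decidable (Spec_format_encoding encoding out) := by unfold Spec_format_encoding; infer_instance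

-- ===== CLAIM (what is proved, stated in full; the proofs are below) =====
def Claim_equal_format_encoding : Prop := ∀ (encoding : List String), Dom_format_encoding encoding → Spec_format_encoding encoding (format_encoding encoding)

-- ===== LEMMAS AND PROOFS =====

-- common normal form: the output characters of the suffix, with A's trailing-space convention
def specS : List String → Bool → List Char
  | [], _ => []
  | w :: tl, st =>
    (if st then pvCapitalize w.toList else w.toList) ++
    (if tl ≠ [] ∧ pvHasAlpha (tl.headD "") then [' '] else []) ++
    specS tl (!pvHasAlpha w)

theorem loopA_eq_specS (rest : List String) : ∀ (encoding : List String) (i : Nat) (result : List Char)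
    (isStart : Bool), encoding.drop i = rest →
    formatLoopA encoding i rest result isStart = result ++ specS rest isStart := by
  induction rest with
  | nil => intro encoding i result isStart h; simp [formatLoopA, specS]
  | cons w tl ih =>
    intro encoding i result isStart h
    have hdrop : encoding.drop (i + 1) = tl := by
      have := congrArg (List.drop 1) h
      simpa [List.drop_drop, Nat.add_comm] using this
    have hlen : i + 1 < encoding.length ↔ tl ≠ [] := by
      constructor
      · intro hl
        have : encoding.drop (i+1) ≠ [] := by
          simp [List.drop_eq_nil_iff]; omega
        simpa [hdrop] using this
      · intro hne
        by_contra hl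
        have : encoding.drop (i+1) = [] := List.drop_eq_nil_of_le (by omega)
        rw [hdrop] at this; exact hne this
    have hget : encoding.getD (i + 1) "" = tl.headD "" := by
      have : (encoding.drop (i+1)).headD "" = tl.headD "" := by rw [hdrop]
      simpa [List.headD_eq_head?_getD, List.head?_drop, List.getD] using this
    rw [formatLoopA, ih encoding (i+1) _ _ hdrop]
    simp only [specS, hget]
    by_cases htl : tl = []
    · have h2 : ¬ i + 1 < encoding.length := by simp [htl] at hlen; omega
      simp [h2, htl]
      cases isStart <;> simp
    · have h1 : i + 1 < encoding.length := hlen.mpr htl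
      by_cases ha : pvHasAlpha (tl.head?.getD "") <;>
        simp [h1, htl, ha] <;> cases isStart <;> simp

-- fmt distributes over extending the current sentence on the right
theorem pvFmt_append (cur : List String) (w : String) (h : cur ≠ []) :
    pvFmt (cur ++ [w]) =
      pvFmt cur ++ (if pvHasAlpha w then ' ' :: w.toList else w.toList) := by
  cases cur with
  | nil => exact absurd rfl h
  | cons c tl => simp [pvFmt]

-- joint invariant for the three stages, by strong induction on the suffix length:
-- (M) starting a fresh sentence renders specS with st = true;
-- (C) continuing sentence cur renders cur's piece then specS with st = false.
theorem stages_eq_specS (n : Nat) : ∀ (rest : List String), rest.length ≤ n →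
    (∀ (b : Bool), pvJoinSents (pvGroups rest []) b =
      (if b ∧ rest ≠ [] ∧ pvHasAlpha (rest.headD "") then [' '] else []) ++ specS rest true) ∧
    (∀ (cur : List String) (b : Bool), cur ≠ [] →
      pvJoinSents (pvGroups rest cur) b =
        (if b ∧ pvHasAlpha (cur.headD "") then [' '] else []) ++ pvFmt cur ++
        (if rest ≠ [] ∧ pvHasAlpha (rest.headD "") then [' '] else []) ++ specS rest false) := by
  induction n with
  | zero =>
    intro rest hle
    have : rest = [] := List.eq_nil_of_length_eq_zero (Nat.le_zero.mp hle)
    subst this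
    constructor
    · intro b; simp [pvGroups, pvJoinSents, specS]
    · intro cur b hne; simp [pvGroups, pvJoinSents, specS, hne]
  | succ n ih =>
    intro rest hle
    cases rest with
    | nil =>
      constructor
      · intro b; simp [pvGroups, pvJoinSents, specS]
      · intro cur b hne; simp [pvGroups, pvJoinSents, specS, hne]
    | cons w tl =>
      have htl : tl.length ≤ n := by simpa using Nat.succ_le_succ_iff.mp hle
      obtain ⟨ihM, ihC⟩ := ih tl htl
      constructor
      · intro b
        by_cases ha : pvHasAlpha w
        · have hc := ihC [w] b (by simp)
          simp only [List.headD_cons] at hc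
          simp [pvGroups, ha, hc, pvFmt, specS]
        · simp [pvGroups, pvJoinSents, ha, ihM true, pvFmt, specS]
      · intro cur b hne
        obtain ⟨c, ctl, rfl⟩ := List.exists_cons_of_ne_nil hne
        by_cases ha : pvHasAlpha w
        · have hc := ihC ((c :: ctl) ++ [w]) b (by simp)
          rw [pvFmt_append (c :: ctl) w (by simp)] at hc
          simp only [List.cons_append, List.headD_cons] at hc
          simp [pvGroups, ha, hc, specS]
        · have hm := ihM true
          have hf := pvFmt_append (c :: ctl) w (by simp)
          simp only [List.cons_append] at hf
          simp [pvGroups, pvJoinSents, ha, hm, hf, specS]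

-- ===== VERDICT (by name: the statement is the Claim_ definition above) =====
theorem format_encoding_spec : Claim_equal_format_encoding := by
  intro encoding _
  unfold Spec_format_encoding format_encoding format_encoding_alt
  rw [loopA_eq_specS encoding encoding 0 [] true (by simp),
    (stages_eq_specS encoding.length encoding le_rfl).1 false]
  simp
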